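-- pv_equiv track=rewrite | github.com/legendorz/udemy_python | udemy_hw.py | three_days
-- ===== SOURCE A (Python) =====
-- def three_days(data):
--     info = []
--     for i in range(len(data)):
--         if i < 3:
--             info.append(0)
--         elif data[i] > data[i-1] and data[i-1] > data[i-2] and data[i-2] > data[i-3]:
--             info.append(1)
--         elif data[i] < data[i-1] and data[i-1] < data[i-2] and data[i-2] < data[i-3]:
--             info.append(-1)
--         else:
--             info.append(0)
--     return info
-- ===== SOURCE B (Python) =====
-- def three_days(data):
--     if not data:
--         return []
--     info = [0]
--     prev = data[0]
--     up = down = 0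
--     for x in data[1:]:
--         if x > prev:
--             up += 1
--             down = 0
--         elif x < prev:
--             down += 1
--             up = 0
--         else:
--             up = down = 0
--         info.append(1 if up >= 3 else (-1 if down >= 3 else 0))
--         prev = x
--     return info
-- ===== Notes on version B (the rewrite author's own statement) =====
-- stated objective: alternative
-- what changed: Replaces the fixed 4-element window re-checked at every index with a single stateful pass maintaining up/down run-length counters that are incremented or reset per adjacent pair.
import Mathlib
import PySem

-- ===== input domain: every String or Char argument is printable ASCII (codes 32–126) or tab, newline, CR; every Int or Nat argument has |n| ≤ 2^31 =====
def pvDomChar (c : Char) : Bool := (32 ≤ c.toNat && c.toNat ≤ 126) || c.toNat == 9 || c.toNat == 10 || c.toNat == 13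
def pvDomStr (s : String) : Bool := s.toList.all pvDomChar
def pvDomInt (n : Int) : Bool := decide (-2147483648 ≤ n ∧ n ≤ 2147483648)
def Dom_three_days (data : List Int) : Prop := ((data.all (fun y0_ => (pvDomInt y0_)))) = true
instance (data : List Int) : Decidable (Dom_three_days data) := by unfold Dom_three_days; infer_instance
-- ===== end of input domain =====

-- B replaces A's fixed 4-element window check at every index by a single stateful pass with
-- up/down run-length counters (same O(n) cost, different decomposition). Return values only.

-- ===== PORT A =====
-- data[i], data[i-1], data[i-2], data[i-3] are only evaluated when 3 ≤ i < len(data), so every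
-- access is in range and pyGetD with default 0 is exact there.
def three_days (data : List Int) : List Int :=
  (PySem.List.pyRange 0 (data.length : Int) 1).foldl
    (fun info i =>
      info ++ [if i < 3 then (0 : Int)
        else if PySem.List.pyGetD data i 0 > PySem.List.pyGetD data (i-1) 0 ∧
                PySem.List.pyGetD data (i-1) 0 > PySem.List.pyGetD data (i-2) 0 ∧
                PySem.List.pyGetD data (i-2) 0 > PySem.List.pyGetD data (i-3) 0 then 1
        else if PySem.List.pyGetD data i 0 < PySem.List.pyGetD data (i-1) 0 ∧
                PySem.List.pyGetD data (i-1) 0 < PySem.List.pyGetD data (i-2) 0 ∧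
                PySem.List.pyGetD data (i-2) 0 < PySem.List.pyGetD data (i-3) 0 then -1
        else 0]) []

-- ===== PORT B =====
-- the loop body of Source B: prev is the previous element, up/down the current run-length counters
def tdGo (prev : Int) (up down : Nat) : List Int → List Int
  | [] => []
  | x :: xs =>
    let u := if x > prev then up + 1 else 0
    let d := if x < prev then down + 1 else 0
    (if u ≥ 3 then (1 : Int) else if d ≥ 3 then -1 else 0) :: tdGo x u d xs

def three_days_alt (data : List Int) : List Int :=
  match data with
  | [] => []
  | x :: xs => 0 :: tdGo x 0 0 xs

-- ===== PRECONDITION & SPEC =====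
def Spec_three_days (data : List Int) (out : List Int) : Prop := out = three_days_alt data
instance (data : List Int) (out : List Int) : Decidable (Spec_three_days data out) := by unfold Spec_three_days; infer_instance

-- ===== CLAIM (what is proved, stated in full; the proofs are below) =====
def Claim_equal_three_days : Prop := ∀ (data : List Int), Dom_three_days data → Spec_three_days data (three_days data)

-- ===== LEMMAS AND PROOFS =====

-- the window flag A computes at index i from the last four elements (oldest first)
def flagOf (w z y x : Int) : Int :=
  if x > y ∧ y > z ∧ z > w then 1 else if x < y ∧ y < z ∧ z < w then -1 else 0

-- window recursion: c,b,a are the three previously seen elements (a most recent)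
def w4 (c b a : Int) : List Int → List Int
  | [] => []
  | x :: xs => flagOf c b a x :: w4 b a x xs

theorem length_w4 (c b a : Int) (xs : List Int) : (w4 c b a xs).length = xs.length := by
  induction xs generalizing c b a with
  | nil => rfl
  | cons x xs ih => simp [w4, ih]

theorem tdGo_eq_w4 (xs : List Int) (c b a : Int) (up down : Nat)
    (h1 : 1 ≤ up ↔ a > b) (h2 : 2 ≤ up ↔ a > b ∧ b > c)
    (h3 : 1 ≤ down ↔ a < b) (h4 : 2 ≤ down ↔ a < b ∧ b < c) :
    tdGo a up down xs = w4 c b a xs := by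
  induction xs generalizing c b a up down with
  | nil => rfl
  | cons x xs ih =>
    simp only [tdGo, w4, flagOf]
    refine congrArg₂ _ ?_ ?_
    · split_ifs <;> omega
    · exact ih b a x _ _ (by split_ifs <;> omega) (by split_ifs <;> omega)
        (by split_ifs <;> omega) (by split_ifs <;> omega)

theorem alt_cons3 (x1 x2 x3 : Int) (xs : List Int) :
    three_days_alt (x1 :: x2 :: x3 :: xs) = 0 :: 0 :: 0 :: w4 x1 x2 x3 xs := by
  simp only [three_days_alt, tdGo]
  refine congrArg₂ _ rfl (congrArg₂ _ ?_ (congrArg₂ _ ?_ ?_))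
  · split_ifs <;> omega
  · split_ifs <;> omega
  · exact tdGo_eq_w4 xs x1 x2 x3 _ _ (by split_ifs <;> omega) (by split_ifs <;> omega)
      (by split_ifs <;> omega) (by split_ifs <;> omega)

theorem w4_getElem (xs : List Int) (c b a : Int) (j : Nat) (hj : j < xs.length) :
    (w4 c b a xs)[j]'(by rw [length_w4]; exact hj) =
      flagOf ((c :: b :: a :: xs).getD j 0) ((c :: b :: a :: xs).getD (j+1) 0)
        ((c :: b :: a :: xs).getD (j+2) 0) ((c :: b :: a :: xs).getD (j+3) 0) := by
  induction xs generalizing c b a j with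
  | nil => simp at hj
  | cons x xs ih =>
    cases j with
    | zero => simp [w4]
    | succ j =>
      have hj' : j < xs.length := by simpa using hj
      have := ih b a x j hj'
      simp only [w4]
      simpa [List.getD] using this

theorem three_days_eq_map (data : List Int) :
    three_days data = (PySem.List.pyRange 0 (data.length : Int) 1).map
      (fun i => if i < 3 then (0 : Int)
        else flagOf (PySem.List.pyGetD data (i-3) 0) (PySem.List.pyGetD data (i-2) 0)
          (PySem.List.pyGetD data (i-1) 0) (PySem.List.pyGetD data i 0)) := by
  unfold three_days
  rw [PySem.List.foldl_append_singleton_eq_map]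
  simp only [List.nil_append, flagOf]

theorem three_days_spec' (data : List Int) : three_days data = three_days_alt data := by
  match data with
  | [] => rfl
  | [x1] =>
    rw [three_days_eq_map]
    simp [three_days_alt, tdGo, PySem.List.pyRange_one_cons (by norm_num : (0:Int) < 1),
      PySem.List.pyRange_one_eq_nil (by norm_num : (1:Int) ≤ 1)]
  | [x1, x2] =>
    rw [three_days_eq_map]
    have : PySem.List.pyRange 0 2 1 = [0, 1] := by decide
    simp only [List.length_cons, List.length_nil]
    norm_num [this, three_days_alt, tdGo]
    split_ifs <;> first | rfl | omega
  | [x1, x2, x3] =>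
    rw [three_days_eq_map]
    have : PySem.List.pyRange 0 3 1 = [0, 1, 2] := by decide
    simp only [List.length_cons, List.length_nil]
    norm_num [this, three_days_alt, tdGo]
    split_ifs <;> first | rfl | omega
  | x1 :: x2 :: x3 :: x4 :: rest =>
    rw [three_days_eq_map, alt_cons3]
    set xs := x4 :: rest with hxs
    set D := x1 :: x2 :: x3 :: xs with hD
    apply List.ext_getElem
    · simp [length_w4, PySem.List.length_pyRange_one, hD, hxs]
      omega
    · intro k h1 h2
      have hkD : k < D.length := by
        simpa [PySem.List.length_pyRange_one] using h1
      rw [List.getElem_map]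
      rw [PySem.List.getElem_pyRange_one]
      have hget : ∀ m : Nat, m < D.length →
          PySem.List.pyGetD D (m : Int) 0 = D.getD m 0 := by
        intro m hm
        rw [PySem.List.pyGetD_natCast]
      match k, hkD with
      | 0, _ => simp
      | 1, _ => norm_num
      | 2, _ => norm_num
      | (j+3), hk3 =>
        have hjxs : j < xs.length := by simpa [hD] using hk3
        have e1 : (0 : Int) + ((j : Nat) + 3 : Nat) = ((j+3 : Nat) : Int) := by push_cast; ring
        rw [e1]
        have hlt : ¬ (((j+3 : Nat) : Int) < 3) := by push_cast; omega
        rw [if_neg hlt]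
        have em3 : ((j+3 : Nat) : Int) - 3 = ((j : Nat) : Int) := by push_cast; ring
        have em2 : ((j+3 : Nat) : Int) - 2 = ((j+1 : Nat) : Int) := by push_cast; ring
        have em1 : ((j+3 : Nat) : Int) - 1 = ((j+2 : Nat) : Int) := by push_cast; ring
        rw [em3, em2, em1,
          hget j (by omega), hget (j+1) (by omega), hget (j+2) (by omega), hget (j+3) hk3]
        have hw : (0 :: 0 :: 0 :: w4 x1 x2 x3 xs)[j+3]'(by simp [length_w4]; omega)
            = (w4 x1 x2 x3 xs)[j]'(by rw [length_w4]; exact hjxs) := by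
          simp
        rw [hw, w4_getElem xs x1 x2 x3 j hjxs]

-- ===== VERDICT (by name: the statement is the Claim_ definition above) =====
theorem three_days_spec : Claim_equal_three_days := by
  intro data _
  unfold Spec_three_days
  exact three_days_spec' data
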